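-- pv_equiv track=rewrite | github.com/blaiseh33/BIOIN-Fact-Extraction | termtagging.py | tag_words
-- ===== SOURCE A (Python) =====
-- def tag_words(dicts, nouns, verbs):
--     all_terms = dict.fromkeys(nouns, None) | dict.fromkeys(verbs, None)
--
--     for phrase in all_terms.keys():
--         for category, list in dicts.items():
--             for term in list:
--                 if phrase.find(term) != -1:
--                     all_terms[phrase] = category
--
--     tagged_words = {}
--     for word in all_terms:
--         if all_terms[word] != None:
--             tagged_words[word] = all_terms[word]
--
--     return tagged_words
-- ===== SOURCE B (Python) =====
-- def tag_words(dicts, nouns, verbs):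
--     # Invert the computation: build ONE hash index term -> (category position, name),
--     # keeping the last category declaring the term, then for each phrase enumerate its
--     # substrings and look them up, keeping the hit from the highest-positioned category.
--     # The per-phrase scan over all terms disappears entirely.
--     best = {}
--     for i, (cat, terms) in enumerate(dicts.items()):
--         for t in terms:
--             best[t] = (i, cat)
--     tagged = {}
--     for phrase in dict.fromkeys(nouns + verbs):
--         hit = (-1, "")
--         for a in range(len(phrase) + 1):
--             for b in range(a, len(phrase) + 1):
--                 cand = best.get(phrase[a:b])
--                 if cand is not None and cand[0] > hit[0]:
--                     hit = cand
--         if hit[0] >= 0: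
--             tagged[phrase] = hit[1]
--     return tagged
-- ===== Notes on version B (the rewrite author's own statement) =====
-- stated objective: faster
-- what changed: B inverts the computation: it builds one hash index term -> (category position, name) over all dictionaries, then for each phrase enumerates the phrase's substrings and looks them up in the index, keeping the hit with the highest category position; the per-phrase scan over every term of every category disappears.
import Mathlib
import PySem

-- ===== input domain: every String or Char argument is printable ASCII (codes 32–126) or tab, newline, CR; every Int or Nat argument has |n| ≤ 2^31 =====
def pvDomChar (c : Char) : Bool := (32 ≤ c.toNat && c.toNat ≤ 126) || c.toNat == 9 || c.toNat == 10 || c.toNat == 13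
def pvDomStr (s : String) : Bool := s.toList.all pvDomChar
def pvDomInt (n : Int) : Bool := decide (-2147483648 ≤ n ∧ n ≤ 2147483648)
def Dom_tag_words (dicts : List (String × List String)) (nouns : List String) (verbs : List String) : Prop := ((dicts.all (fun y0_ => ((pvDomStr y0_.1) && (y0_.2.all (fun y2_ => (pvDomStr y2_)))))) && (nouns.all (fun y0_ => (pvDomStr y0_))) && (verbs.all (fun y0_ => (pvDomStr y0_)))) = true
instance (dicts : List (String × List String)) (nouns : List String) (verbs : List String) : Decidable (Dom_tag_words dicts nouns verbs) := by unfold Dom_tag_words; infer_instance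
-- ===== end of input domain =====

-- B replaces A's per-phrase scan over every term of every category by one hash index
-- term -> (category position, name) and, per phrase, lookups of the phrase's substrings.

-- ===== PORT A =====
-- dict.fromkeys(xs, None): fold of insert-with-None over xs
def pvFromkeysNone (xs : List String) : PySem.Dict String (Option String) :=
  xs.foldl (fun d w => d.insert w none) PySem.Dict.empty

def tag_words (dicts : List (String × List String)) (nouns : List String) (verbs : List String) : List (String × String) :=
  -- all_terms = dict.fromkeys(nouns, None) | dict.fromkeys(verbs, None)  ('|' = copy of lhs updated with rhs's items)
  let all_terms0 := PySem.Dict.update (pvFromkeysNone nouns) (pvFromkeysNone verbs).items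
  -- the key view being iterated is fixed: the loop only mutates values
  let all_terms := all_terms0.keys.foldl (fun d phrase =>
      dicts.foldl (fun d ct =>
        ct.2.foldl (fun d term =>
          if PySem.Str.find phrase term ≠ -1 then d.insert phrase (some ct.1) else d) d) d) all_terms0
  -- second loop: keep the words whose tag is not None (all_terms[word] never raises: word is a key)
  (all_terms.keys.foldl (fun td word =>
      match all_terms.get? word with
      | some (some c) => td.insert word c
      | _ => td) (PySem.Dict.empty : PySem.Dict String String)).items

-- ===== PORT B =====
-- best: the index term -> (category position, name); dict assignment overwrites in place
def pvBest (dicts : List (String × List String)) : PySem.Dict String (Int × String) :=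
  (PySem.List.enumerate dicts).foldl
    (fun b ic => ic.2.2.foldl (fun b t => b.insert t (ic.1, ic.2.1)) b)
    PySem.Dict.empty

-- 'cand = best.get(sub); if cand is not None and cand[0] > hit[0]: hit = cand'
def pvStep (best : PySem.Dict String (Int × String)) (hit : Int × String) (s : String) : Int × String :=
  match best.get? s with
  | some cand => if cand.1 > hit.1 then cand else hit
  | none => hit

-- the nested substring loops of Source B for one phrase
def pvHit (best : PySem.Dict String (Int × String)) (phrase : String) : Int × String :=
  (PySem.List.pyRange 0 (PySem.Str.len phrase + 1) 1).foldl (fun hit a =>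
    (PySem.List.pyRange a (PySem.Str.len phrase + 1) 1).foldl
      (fun hit b => pvStep best hit (PySem.Str.slice phrase (some a) (some b))) hit)
    ((-1 : Int), "")

def tag_words_alt (dicts : List (String × List String)) (nouns : List String) (verbs : List String) : List (String × String) :=
  let best := pvBest dicts
  ((PySem.List.dedup (nouns ++ verbs)).foldl (fun tagged phrase =>
      let hit := pvHit best phrase
      if hit.1 ≥ 0 then tagged.insert phrase hit.2 else tagged)
    (PySem.Dict.empty : PySem.Dict String String)).items

-- ===== PRECONDITION & SPEC =====
def Spec_tag_words (dicts : List (String × List String)) (nouns : List String) (verbs : List String) (out : List (String × String)) : Prop := out = tag_words_alt dicts nouns verbs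
instance (dicts : List (String × List String)) (nouns : List String) (verbs : List String) (out : List (String × String)) : Decidable (Spec_tag_words dicts nouns verbs out) := by unfold Spec_tag_words; infer_instance

-- ===== CLAIM (what is proved, stated in full; the proofs are below) =====
def Claim_equal_tag_words : Prop := ∀ (dicts : List (String × List String)) (nouns : List String) (verbs : List String), Dom_tag_words dicts nouns verbs → Spec_tag_words dicts nouns verbs (tag_words dicts nouns verbs)

-- ===== LEMMAS AND PROOFS =====

-- Set.update distributes over an inner Set.add
theorem pv_update_add (s u : PySem.Set String) (x : String) :
    PySem.Set.update s (PySem.Set.add u x) = PySem.Set.add (PySem.Set.update s u) x := by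
  by_cases hc : x ∈ u
  · have hx : x ∈ PySem.Set.update s u := (PySem.Set.mem_update s u x).2 (Or.inr hc)
    simp [PySem.Set.add, hc, hx]
  · have h1 : PySem.Set.add u x = u ++ [x] := by simp [PySem.Set.add, hc]
    rw [h1]
    show List.foldl PySem.Set.add s (u ++ [x]) = _
    rw [List.foldl_append]
    rfl

-- Set.update absorbs a pre-deduplication of its argument
theorem pv_update_update (xs : List String) : ∀ (u s : PySem.Set String),
    PySem.Set.update s (PySem.Set.update u xs) = PySem.Set.update (PySem.Set.update s u) xs := by
  induction xs with
  | nil => intro u s; rfl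
  | cons x xs ih =>
    intro u s
    show PySem.Set.update s (PySem.Set.update (PySem.Set.add u x) xs)
        = PySem.Set.update (PySem.Set.add (PySem.Set.update s u) x) xs
    rw [ih, pv_update_add]

-- a fold of insert-with-None keeps every value None
theorem pv_values_none (ws : List String) : ∀ (d : PySem.Dict String (Option String)),
    (∀ p ∈ d.items, p.2 = none) →
    ∀ p ∈ (ws.foldl (fun d w => d.insert w (none : Option String)) d).items, p.2 = none := by
  induction ws with
  | nil => intro d h; exact h
  | cons w ws ih =>
    intro d h
    refine ih _ ?_
    intro p hp
    rcases (PySem.Dict.mem_items_insert _ _ _ _).1 hp with rfl | ⟨hp', _⟩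
    · rfl
    · exact h p hp'

-- items of a fold of insert-with-None
theorem pv_items_fromkeys (ws : List String) (d : PySem.Dict String (Option String))
    (h : ∀ p ∈ d.items, p.2 = none) :
    (ws.foldl (fun d w => d.insert w (none : Option String)) d).items
      = (PySem.Set.update d.keys ws).map (fun w => (w, none)) := by
  have hv := pv_values_none ws d h
  have hk := PySem.Dict.keys_foldl_insert ws (fun _ _ => (none : Option String)) d
  set D := ws.foldl (fun d w => d.insert w (none : Option String)) d with hD
  have h1 : D.items.map (fun p => (p.1, (none : Option String))) = D.items := by
    conv_rhs => rw [← List.map_id D.items]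
    refine List.map_congr_left ?_
    intro p hp
    have := hv p hp
    cases p; simp_all
  calc D.items = (D.items.map Prod.fst).map (fun w => (w, (none : Option String))) := by
        rw [List.map_map]; exact h1.symm
    _ = (PySem.Set.update d.keys ws).map (fun w => (w, none)) := by
        rw [show D.items.map Prod.fst = D.keys from rfl, hk]

-- items of dict.fromkeys(xs, None)
theorem pv_items_fkn (xs : List String) :
    (pvFromkeysNone xs).items = (PySem.List.dedup xs).map (fun w => (w, (none : Option String))) := by
  have h := pv_items_fromkeys xs PySem.Dict.empty (by intro p hp; simp [PySem.Dict.empty] at hp)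
  rw [pvFromkeysNone, h]
  rfl

-- items of A's initial all_terms dict
theorem pv_items_all0 (nouns verbs : List String) :
    (PySem.Dict.update (pvFromkeysNone nouns) (pvFromkeysNone verbs).items).items
      = (PySem.List.dedup (nouns ++ verbs)).map (fun w => (w, (none : Option String))) := by
  rw [PySem.Dict.update, pv_items_fkn verbs, List.foldl_map]
  have h := pv_items_fromkeys (PySem.List.dedup verbs) (pvFromkeysNone nouns)
      (by rw [pv_items_fkn]; intro p hp; simp at hp; obtain ⟨w, _, rfl⟩ := hp; rfl)
  rw [h]
  congr 1
  have hk : (pvFromkeysNone nouns).keys = PySem.List.dedup nouns := by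
    show (pvFromkeysNone nouns).items.map Prod.fst = _
    rw [pv_items_fkn, List.map_map]; simp [Function.comp_def]
  rw [hk]
  have h2 : PySem.List.dedup verbs = PySem.Set.update [] verbs := rfl
  rw [h2, pv_update_update]
  show PySem.Set.update (PySem.Set.ofList nouns) verbs = PySem.List.dedup (nouns ++ verbs)
  show List.foldl PySem.Set.add (PySem.Set.ofList nouns) verbs = _
  rw [show PySem.List.dedup (nouns ++ verbs) = List.foldl PySem.Set.add PySem.Set.empty (nouns ++ verbs) from rfl,
      List.foldl_append]
  rfl

-- 'term is a substring of phrase', read off A's test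
theorem pv_hit_iff (p t : String) : (PySem.Str.find p t ≠ -1) ↔ PySem.Str.isIn t p = true := by
  rw [PySem.Str.find_eq, PySem.Str.isIn_eq, PySem.Chars.isIn_iff_infix]
  exact PySem.Chars.find_ne_neg_one_iff _ _

-- inner terms loop of A: repeated same-key inserts collapse to one conditional insert
theorem pv_terms_fold (p c : String) (ts : List String) : ∀ (d : PySem.Dict String (Option String)),
    ts.foldl (fun d t => if PySem.Str.find p t ≠ -1 then d.insert p (some c) else d) d
      = if ts.any (fun t => PySem.Str.isIn t p) then d.insert p (some c) else d := by
  induction ts with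
  | nil => intro d; simp
  | cons t ts ih =>
    intro d
    rw [List.foldl_cons, ih, List.any_cons]
    by_cases h : PySem.Str.isIn t p = true
    · rw [if_pos ((pv_hit_iff p t).2 h), h]
      simp [PySem.Dict.insert_insert_self]
    · have hf : ¬ (PySem.Str.find p t ≠ -1) := fun hx => h ((pv_hit_iff p t).1 hx)
      rw [if_neg hf]
      simp only [Bool.not_eq_true] at h
      rw [h]
      simp

-- categories loop of A: the surviving insert is the first match of the reversed list
theorem pv_dicts_fold (p : String) (ds : List (String × List String)) :
    ∀ (d : PySem.Dict String (Option String)),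
    ds.foldl (fun d ct =>
        ct.2.foldl (fun d term =>
          if PySem.Str.find p term ≠ -1 then d.insert p (some ct.1) else d) d) d
      = match ds.reverse.find? (fun ct => ct.2.any (fun t => PySem.Str.isIn t p)) with
        | some ct => d.insert p (some ct.1)
        | none => d := by
  induction ds with
  | nil => intro d; simp
  | cons ct ds ih =>
    intro d
    rw [List.foldl_cons, ih, pv_terms_fold, List.reverse_cons, List.find?_append]
    cases hf : ds.reverse.find? (fun ct => ct.2.any (fun t => PySem.Str.isIn t p)) with
    | some ct' =>
      simp only [Option.some_or]
      by_cases h : ct.2.any (fun t => PySem.Str.isIn t p) = true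
      · rw [if_pos h]; simp [PySem.Dict.insert_insert_self]
      · rw [if_neg (by simpa using h)]
    | none =>
      simp only [Option.none_or]
      by_cases h : ct.2.any (fun t => PySem.Str.isIn t p) = true
      · rw [if_pos h]
        have h' : (ct.2.any fun t => PySem.Chars.isIn t.toList p.toList) = true := by
          simpa [PySem.Str.isIn_eq] using h
        simp [h']
      · rw [if_neg (by simpa using h)]
        have h' : (ct.2.any fun t => PySem.Chars.isIn t.toList p.toList) = false := by
          simpa [PySem.Str.isIn_eq] using h
        simp [h']

-- the tag A's first phase ends up storing for a phrase
def pvTag (dicts : List (String × List String)) (p : String) : Option String :=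
  match dicts.reverse.find? (fun ct => ct.2.any (fun t => PySem.Str.isIn t p)) with
  | some ct => some ct.1
  | none => none

-- first phase of A, whole dict: each phrase's slot is rewritten in place
theorem pv_phase1 (dicts : List (String × List String)) (ps : List String) :
    ∀ (d : PySem.Dict String (Option String)) (pre : List (String × Option String)),
    d.items = pre ++ ps.map (fun p => (p, (none : Option String))) →
    (pre.map Prod.fst ++ ps).Nodup →
    (ps.foldl (fun d p =>
        match dicts.reverse.find? (fun ct => ct.2.any (fun t => PySem.Str.isIn t p)) with
        | some ct => d.insert p (some ct.1)
        | none => d) d).items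
      = pre ++ ps.map (fun p => (p, pvTag dicts p)) := by
  induction ps with
  | nil => intro d pre h _; simpa using h
  | cons p ps ih =>
    intro d pre h hnd
    have hp_pre : p ∉ pre.map Prod.fst := by
      intro hx
      exact (List.disjoint_of_nodup_append hnd) hx (List.mem_cons_self ..)
    have hp_ps : p ∉ ps := by
      rw [List.nodup_append] at hnd
      have := hnd.2.1
      simp [List.nodup_cons] at this
      exact this.1
    rw [List.foldl_cons]
    cases hf : dicts.reverse.find? (fun ct => ct.2.any (fun t => PySem.Str.isIn t p)) with
    | none =>
      have htag : pvTag dicts p = none := by rw [pvTag, hf]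
      have h1 : d.items = (pre ++ [(p, (none : Option String))]) ++ ps.map (fun p => (p, (none : Option String))) := by
        rw [h]; simp
      have := ih d (pre ++ [(p, (none : Option String))]) h1 (by simpa [List.append_assoc] using hnd)
      simpa [htag, List.append_assoc] using this
    | some ct =>
      have htag : pvTag dicts p = some ct.1 := by rw [pvTag, hf]
      have hcont : d.contains p = true := by
        rw [PySem.Dict.contains_iff_mem_keys]
        show p ∈ d.items.map Prod.fst
        rw [h]; simp
      have hins : (d.insert p (some ct.1)).items
          = (pre ++ [(p, some ct.1)]) ++ ps.map (fun p => (p, (none : Option String))) := by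
        rw [PySem.Dict.items_insert_of_contains d (some ct.1) hcont, h]
        rw [List.map_append, List.map_cons]
        have hpre : pre.map (fun q => if q.1 == p then (p, some ct.1) else q) = pre := by
          conv_rhs => rw [← List.map_id pre]
          refine List.map_congr_left ?_
          intro q hq
          have : q.1 ≠ p := fun he => hp_pre (he ▸ List.mem_map_of_mem hq)
          simp [this]
        have hps : (ps.map (fun p => (p, (none : Option String)))).map
              (fun q => if q.1 == p then (p, some ct.1) else q)
            = ps.map (fun p => (p, (none : Option String))) := by
          rw [List.map_map]
          refine List.map_congr_left ?_
          intro x hx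
          have : x ≠ p := fun he => hp_ps (he ▸ hx)
          simp [this]
        rw [hpre, List.map_cons, hps]
        simp
      have := ih (d.insert p (some ct.1)) (pre ++ [(p, some ct.1)]) hins
        (by simpa [List.append_assoc] using hnd)
      simpa [htag, List.append_assoc] using this

-- ===== B-side lemmas =====

-- repeated same-value inserts over a term list, looked up
theorem pv_get_fold_insert (v : Int × String) (t : String) (ts : List String) :
    ∀ (b : PySem.Dict String (Int × String)),
    (ts.foldl (fun b s => b.insert s v) b).get? t = if t ∈ ts then some v else b.get? t := by
  induction ts with
  | nil => intro b; simp
  | cons s ts ih =>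
    intro b
    rw [List.foldl_cons, ih]
    by_cases h1 : t ∈ ts
    · simp [h1]
    · by_cases h2 : t = s
      · simp [h2]
      · simp [h1, h2, PySem.Dict.get?_insert]

-- the index dict: a term's entry comes from the last category listing it
theorem pv_best_fold (t : String) (l : List (Int × String × List String)) :
    ∀ (d : PySem.Dict String (Int × String)),
    (l.foldl (fun b ic => ic.2.2.foldl (fun b s => b.insert s (ic.1, ic.2.1)) b) d).get? t
      = match l.reverse.find? (fun q => decide (t ∈ q.2.2)) with
        | some q => some (q.1, q.2.1)
        | none => d.get? t := by
  induction l with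
  | nil => intro d; simp
  | cons q l ih =>
    intro d
    rw [List.foldl_cons, ih, List.reverse_cons, List.find?_append]
    cases hf : l.reverse.find? (fun q => decide (t ∈ q.2.2)) with
    | some q' => simp only [Option.some_or]
    | none =>
      simp only [Option.none_or]
      rw [pv_get_fold_insert]
      by_cases h : t ∈ q.2.2
      · simp [h]
      · simp [h]

theorem pv_best_get (dicts : List (String × List String)) (t : String) :
    (pvBest dicts).get? t
      = match (PySem.List.enumerate dicts).reverse.find? (fun q => decide (t ∈ q.2.2)) with
        | some q => some (q.1, q.2.1)
        | none => none := by
  rw [pvBest, pv_best_fold]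
  cases (PySem.List.enumerate dicts).reverse.find? (fun q => decide (t ∈ q.2.2)) <;> rfl

-- find? from the right on an index-increasing list returns the maximal matching index
theorem pv_find_reverse_max {α : Type} (l : List (Int × α)) (pred : Int × α → Bool)
    (hp : l.Pairwise (fun p q => p.1 < q.1)) (q : Int × α)
    (h : l.reverse.find? pred = some q) :
    ∀ x ∈ l, pred x = true → x.1 ≤ q.1 := by
  obtain ⟨hq, as, bs, hsplit, hfail⟩ := List.find?_eq_some_iff_append.1 h
  have hl : l = bs.reverse ++ q :: as.reverse := by
    have := congrArg List.reverse hsplit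
    simpa using this
  intro x hx hpx
  rw [hl] at hx hp
  rcases List.mem_append.1 hx with hx1 | hx2
  · have := (List.pairwise_append.1 hp).2.2 x hx1 q (List.mem_cons_self ..)
    exact le_of_lt this
  · rcases List.mem_cons.1 hx2 with rfl | hx3
    · exact le_refl _
    · exact absurd hpx (by simpa using hfail x (List.mem_reverse.1 hx3))

-- two enumerate entries with the same index are equal
theorem pv_enum_inj (dicts : List (String × List String)) (q q' : Int × String × List String)
    (hq : q ∈ PySem.List.enumerate dicts) (hq' : q' ∈ PySem.List.enumerate dicts)
    (h : q.1 = q'.1) : q = q' := by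
  obtain ⟨k, hk, rfl⟩ := (PySem.List.mem_enumerate_iff dicts 0 q).1 hq
  obtain ⟨k', hk', rfl⟩ := (PySem.List.mem_enumerate_iff dicts 0 q').1 hq'
  simp only [zero_add] at h ⊢
  have : k = k' := by exact_mod_cast h
  subst this
  rfl

theorem pv_enum_nonneg (dicts : List (String × List String)) (q : Int × String × List String)
    (hq : q ∈ PySem.List.enumerate dicts) : 0 ≤ q.1 := by
  obtain ⟨k, hk, rfl⟩ := (PySem.List.mem_enumerate_iff dicts 0 q).1 hq
  simp

-- the flat list of substrings a phrase's nested loops visit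
def pvSubs (p : String) : List String :=
  (PySem.List.pyRange 0 (PySem.Str.len p + 1) 1).flatMap (fun a =>
    (PySem.List.pyRange a (PySem.Str.len p + 1) 1).map (fun b =>
      PySem.Str.slice p (some a) (some b)))

theorem pv_hit_flat (best : PySem.Dict String (Int × String)) (p : String) :
    pvHit best p = (pvSubs p).foldl (pvStep best) ((-1 : Int), "") := by
  rw [pvHit, pvSubs, List.foldl_flatMap]
  simp [List.foldl_map]

-- every visited substring is an infix of the phrase
theorem pv_subs_infix (p s : String) (h : s ∈ pvSubs p) : s.toList <:+: p.toList := by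
  rw [pvSubs] at h
  obtain ⟨a, ha, hs⟩ := List.mem_flatMap.1 h
  obtain ⟨b, hb, rfl⟩ := List.mem_map.1 hs
  obtain ⟨ha0, _⟩ := PySem.List.mem_pyRange_one.1 ha
  obtain ⟨hab, _⟩ := PySem.List.mem_pyRange_one.1 hb
  have hb0 : 0 ≤ b := le_trans ha0 hab
  have : (PySem.Str.slice p (some a) (some b)).toList
      = (p.toList.drop a.toNat).take (b.toNat - a.toNat) := by
    rw [PySem.Str.toList_slice, PySem.Chars.slice_eq_listSlice, PySem.List.slice_toNat _ ha0 hb0]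
  rw [this]
  exact ((List.take_prefix _ _).isInfix).trans ((List.drop_suffix _ _).isInfix)

-- every infix of the phrase is visited
theorem pv_infix_mem_subs (p t : String) (h : t.toList <:+: p.toList) : t ∈ pvSubs p := by
  obtain ⟨u, v, huv⟩ := h
  have hlen : (PySem.Str.len p : Int) = (p.toList.length : Int) := by
    simp [PySem.Str.len_eq]
  have hplen : u.length + (t.toList.length + v.length) = p.toList.length := by
    rw [← huv, List.append_assoc, List.length_append, List.length_append]
  rw [pvSubs]
  refine List.mem_flatMap.2 ⟨(u.length : Int), ?_, ?_⟩
  · refine PySem.List.mem_pyRange_one.2 ⟨by positivity, ?_⟩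
    rw [hlen]; omega
  · refine List.mem_map.2 ⟨((u.length + t.toList.length : Nat) : Int), ?_, ?_⟩
    · refine PySem.List.mem_pyRange_one.2 ⟨by omega, ?_⟩
      rw [hlen]; omega
    · refine String.ext ?_
      rw [PySem.Str.toList_slice, PySem.Chars.slice_eq_listSlice]
      have : ((u.length + t.toList.length : Nat) : Int) = (u.length : Int) + (t.toList.length : Int) := by push_cast; ring
      rw [this, PySem.List.slice_natCast_add]
      have hP : p.toList = u ++ (t.toList ++ v) := by rw [← huv]; simp [List.append_assoc]
      rw [hP, List.drop_left, List.take_left]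

-- the fold's three invariants: result is init or a looked-up candidate, never decreases,
-- and dominates every candidate of the list
theorem pv_fold_inv (best : PySem.Dict String (Int × String)) (L : List String) :
    ∀ (h : Int × String),
      (L.foldl (pvStep best) h = h ∨ ∃ s ∈ L, best.get? s = some (L.foldl (pvStep best) h)) ∧
      h.1 ≤ (L.foldl (pvStep best) h).1 ∧
      (∀ s ∈ L, ∀ v, best.get? s = some v → v.1 ≤ (L.foldl (pvStep best) h).1) := by
  induction L with
  | nil => intro h; exact ⟨Or.inl rfl, le_refl _, by simp⟩
  | cons s L ih =>
    intro h
    rw [List.foldl_cons]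
    obtain ⟨h1, h2, h3⟩ := ih (pvStep best h s)
    have hstep : pvStep best h s = h ∨ (best.get? s = some (pvStep best h s) ∧ h.1 ≤ (pvStep best h s).1) := by
      rw [pvStep]
      cases hg : best.get? s with
      | none => exact Or.inl rfl
      | some cand =>
        by_cases hc : cand.1 > h.1
        · exact Or.inr ⟨by simp [hc], by simp [hc]; omega⟩
        · exact Or.inl (by simp [hc])
    have hh : h.1 ≤ (pvStep best h s).1 := by
      rcases hstep with he | ⟨_, hle⟩
      · rw [he]
      · exact hle
    refine ⟨?_, le_trans hh h2, ?_⟩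
    · rcases h1 with he | ⟨s', hs', hv⟩
      · rcases hstep with he2 | ⟨hv2, _⟩
        · exact Or.inl (he.trans he2)
        · exact Or.inr ⟨s, List.mem_cons_self .., by rw [he]; exact hv2⟩
      · exact Or.inr ⟨s', List.mem_cons_of_mem _ hs', hv⟩
    · intro s' hs' v hv
      rcases List.mem_cons.1 hs' with he | hmem
      · -- v comes from looking up s itself
        have : v.1 ≤ (pvStep best h s).1 := by
          rw [pvStep, ← he, hv]
          by_cases hc : v.1 > h.1
          · simp [hc]
          · simp [hc]; omega
        exact le_trans this h2
      · exact h3 s' hmem v hv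

-- if no visited substring is indexed, the fold stays at the initial value
theorem pv_fold_id (best : PySem.Dict String (Int × String)) (L : List String)
    (hnone : ∀ s ∈ L, best.get? s = none) : ∀ h, L.foldl (pvStep best) h = h := by
  induction L with
  | nil => intro h; rfl
  | cons s L ih =>
    intro h
    rw [List.foldl_cons]
    have : pvStep best h s = h := by rw [pvStep, hnone s (List.mem_cons_self ..)]
    rw [this]
    exact ih (fun s hs => hnone s (List.mem_cons_of_mem _ hs)) h

-- per-phrase: B's hit is exactly the last matching category (with its position)
theorem pv_hit_eq (dicts : List (String × List String)) (p : String) :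
    pvHit (pvBest dicts) p
      = match (PySem.List.enumerate dicts).reverse.find?
            (fun q => q.2.2.any (fun t => PySem.Str.isIn t p)) with
        | some q => (q.1, q.2.1)
        | none => ((-1 : Int), "") := by
  rw [pv_hit_flat]
  set E := PySem.List.enumerate dicts with hE
  cases hf : E.reverse.find? (fun q => q.2.2.any (fun t => PySem.Str.isIn t p)) with
  | none =>
    have hnone : ∀ s ∈ pvSubs p, (pvBest dicts).get? s = none := by
      intro s hs
      rw [pv_best_get]
      cases hg : E.reverse.find? (fun q => decide (s ∈ q.2.2)) with
      | none => rfl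
      | some q' =>
        exfalso
        have hq'mem : q' ∈ E := List.mem_reverse.1 (List.mem_of_find?_eq_some hg)
        have hsq' : s ∈ q'.2.2 := by simpa using List.find?_some hg
        have hpred : q'.2.2.any (fun t => PySem.Str.isIn t p) = true :=
          List.any_eq_true.2 ⟨s, hsq', (PySem.Str.isIn_iff_infix s p).2 (pv_subs_infix p s hs)⟩
        exact (List.find?_eq_none.1 hf q' (List.mem_reverse.2 hq'mem)) hpred
    exact pv_fold_id _ _ hnone _
  | some q =>
    have hqmem : q ∈ E := List.mem_reverse.1 (List.mem_of_find?_eq_some hf)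
    have hqpred : q.2.2.any (fun t => PySem.Str.isIn t p) = true := by
      simpa using List.find?_some hf
    obtain ⟨t0, ht0, ht0in⟩ := List.any_eq_true.1 hqpred
    have hq0 : 0 ≤ q.1 := pv_enum_nonneg dicts q hqmem
    have hpair : E.Pairwise (fun a b => a.1 < b.1) := PySem.List.pairwise_lt_enumerate dicts 0
    -- any indexed visited substring belongs to a matching category at position ≤ q.1,
    -- and its looked-up pair is exactly that category's (position, name)
    have hcand : ∀ s ∈ pvSubs p, ∀ v, (pvBest dicts).get? s = some v →
        ∃ q', q' ∈ E ∧ q'.2.2.any (fun t => PySem.Str.isIn t p) = true ∧ v = (q'.1, q'.2.1) := by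
      intro s hs v hv
      rw [pv_best_get] at hv
      cases hg : E.reverse.find? (fun q => decide (s ∈ q.2.2)) with
      | none => rw [hg] at hv; exact absurd hv (by simp)
      | some q' =>
        rw [hg] at hv
        have hq'mem : q' ∈ E := List.mem_reverse.1 (List.mem_of_find?_eq_some hg)
        have hsq' : s ∈ q'.2.2 := by simpa using List.find?_some hg
        refine ⟨q', hq'mem, ?_, by simpa using hv.symm⟩
        exact List.any_eq_true.2 ⟨s, hsq', (PySem.Str.isIn_iff_infix s p).2 (pv_subs_infix p s hs)⟩
    -- the pair (q.1, q.2.1) itself is looked up at substring t0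
    have ht0mem : t0 ∈ pvSubs p :=
      pv_infix_mem_subs p t0 ((PySem.Str.isIn_iff_infix t0 p).1 ht0in)
    have ht0get : (pvBest dicts).get? t0 = some (q.1, q.2.1) := by
      rw [pv_best_get]
      cases hg : E.reverse.find? (fun q => decide (t0 ∈ q.2.2)) with
      | none =>
        exfalso
        exact (List.find?_eq_none.1 hg q (List.mem_reverse.2 hqmem)) (by simpa using ht0)
      | some q' =>
        have hq'mem : q' ∈ E := List.mem_reverse.1 (List.mem_of_find?_eq_some hg)
        have ht0q' : t0 ∈ q'.2.2 := by simpa using List.find?_some hg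
        have h1 : q'.1 ≤ q.1 := by
          refine pv_find_reverse_max E _ hpair q hf q' hq'mem ?_
          exact List.any_eq_true.2 ⟨t0, ht0q', (PySem.Str.isIn_iff_infix t0 p).2
            (pv_subs_infix p t0 ht0mem)⟩
        have h2 : q.1 ≤ q'.1 :=
          pv_find_reverse_max E _ hpair q' hg q hqmem (by simpa using ht0)
        have : q' = q := pv_enum_inj dicts q' q hq'mem hqmem (le_antisymm h1 h2)
        rw [this]
    obtain ⟨hP1, _, hP3⟩ := pv_fold_inv (pvBest dicts) (pvSubs p) ((-1 : Int), "")
    set r := (pvSubs p).foldl (pvStep (pvBest dicts)) ((-1 : Int), "") with hr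
    have hge : q.1 ≤ r.1 := hP3 t0 ht0mem _ ht0get
    rcases hP1 with he | ⟨s, hs, hv⟩
    · exfalso
      rw [he] at hge
      omega
    · obtain ⟨q', hq'mem, hq'pred, hre⟩ := hcand s hs r hv
      have hge' : q.1 ≤ q'.1 := by rw [hre] at hge; exact hge
      have hle : q'.1 ≤ q.1 := pv_find_reverse_max E _ hpair q hf q' hq'mem hq'pred
      have heq : q' = q := pv_enum_inj dicts q' q hq'mem hqmem (le_antisymm hle hge')
      rw [hre, heq]

-- A's reverse find over the plain list is the second component of B's over the indexed list
theorem pv_find_connect (dicts : List (String × List String)) (p : String) :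
    dicts.reverse.find? (fun ct => ct.2.any (fun t => PySem.Str.isIn t p))
      = ((PySem.List.enumerate dicts).reverse.find?
          (fun q => q.2.2.any (fun t => PySem.Str.isIn t p))).map (fun q => q.2) := by
  conv_lhs => rw [← PySem.List.map_snd_enumerate dicts 0, ← List.map_reverse, List.find?_map]
  rfl

-- ===== VERDICT (by name: the statement is the Claim_ definition above) =====
theorem tag_words_spec : Claim_equal_tag_words := by
  intro dicts nouns verbs _
  unfold Spec_tag_words
  simp only [tag_words, tag_words_alt]
  set phrases := PySem.List.dedup (nouns ++ verbs) with hphr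
  have hnd : phrases.Nodup := PySem.List.nodup_dedup _
  set all0 := PySem.Dict.update (pvFromkeysNone nouns) (pvFromkeysNone verbs).items with hall0
  have h0 : all0.items = phrases.map (fun w => (w, (none : Option String))) := pv_items_all0 nouns verbs
  have hk0 : all0.keys = phrases := by
    show all0.items.map Prod.fst = phrases
    rw [h0, List.map_map]; simp [Function.comp_def]
  -- phase 1
  have hbody : (fun (d : PySem.Dict String (Option String)) phrase =>
        dicts.foldl (fun d ct =>
          ct.2.foldl (fun d term =>
            if PySem.Str.find phrase term ≠ -1 then d.insert phrase (some ct.1) else d) d) d)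
      = (fun d p =>
        match dicts.reverse.find? (fun ct => ct.2.any (fun t => PySem.Str.isIn t p)) with
        | some ct => d.insert p (some ct.1)
        | none => d) := by
    funext d p
    exact pv_dicts_fold p dicts d
  rw [hk0, hbody]
  have h1 : (phrases.foldl (fun d p =>
        match dicts.reverse.find? (fun ct => ct.2.any (fun t => PySem.Str.isIn t p)) with
        | some ct => d.insert p (some ct.1)
        | none => d) all0).items = phrases.map (fun p => (p, pvTag dicts p)) :=
    pv_phase1 dicts phrases all0 [] (by simpa using h0) (by simpa using hnd)
  set all1 := phrases.foldl (fun d p =>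
        match dicts.reverse.find? (fun ct => ct.2.any (fun t => PySem.Str.isIn t p)) with
        | some ct => d.insert p (some ct.1)
        | none => d) all0 with hall1
  have hk1 : all1.keys = phrases := by
    show all1.items.map Prod.fst = phrases
    rw [h1, List.map_map]; simp [Function.comp_def]
  have hknd : all1.keys.Nodup := by rw [hk1]; exact hnd
  have hget : ∀ w ∈ phrases, all1.get? w = some (pvTag dicts w) := by
    intro w hw
    exact PySem.Dict.get?_of_mem_items _
      (by rw [h1]; exact List.mem_map_of_mem hw) hknd
  -- phase 2: A's filtering fold and B's direct fold agree pointwise on the phrases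
  rw [hk1]
  congr 1
  refine PySem.List.foldl_congr_mem phrases _ _ _ ?_
  intro td w hw
  rw [hget w hw]
  show _ = (fun tagged phrase =>
      let hit := pvHit (pvBest dicts) phrase
      if hit.1 ≥ 0 then tagged.insert phrase hit.2 else tagged) td w
  simp only
  rw [pv_hit_eq, pvTag, pv_find_connect]
  cases hf : (PySem.List.enumerate dicts).reverse.find?
      (fun q => q.2.2.any (fun t => PySem.Str.isIn t w)) with
  | none => simp
  | some q =>
    have hq0 : 0 ≤ q.1 :=
      pv_enum_nonneg dicts q (List.mem_reverse.1 (List.mem_of_find?_eq_some hf))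
    simp [hq0]
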